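-- pv_equiv track=rewrite | github.com/SiyuYan/demo-practice | src/python_test/test5.py | scatterPalindrome
-- ===== SOURCE A (Python) =====
-- def scatterPalindrome(strToEvaluates):
--     result = []
--     for strToEvaluate in strToEvaluates:
--         longest_count = 0
--         list = []
--         for start in range(len(strToEvaluate) + 1):
--             for end in range(start + 1, len(strToEvaluate) + 1):
--                 list.append(strToEvaluate[start:end])
--         for sub_str in list:
--             dict = {}
--             for word in sub_str:
--                 if word not in dict:
--                     dict[word] = 1
--                 else:
--                     dict[word] = dict[word] + 1
--             odd_cnt = 0
--             for key, value in dict.items():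
--                 if value % 2 != 0:
--                     odd_cnt = odd_cnt + 1
--             if odd_cnt <= 1:
--                 longest_count = longest_count + 1
--         result.append(longest_count)
--     return result
-- ===== SOURCE B (Python) =====
-- def scatterPalindrome(strToEvaluates):
--     result = []
--     for s in strToEvaluates:
--         n = len(s)
--         pref = [0] * (n + 1)
--         for i in range(n):
--             pref[i + 1] = pref[i] ^ (1 << ord(s[i]))
--         cnt = 0
--         for i in range(n):
--             for j in range(i + 1, n + 1):
--                 d = pref[i] ^ pref[j]
--                 if d & (d - 1) == 0:
--                     cnt += 1
--         result.append(cnt)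
--     return result
-- ===== Notes on version B (the rewrite author's own statement) =====
-- stated objective: faster
-- what changed: Instead of materialising every substring and counting character frequencies with a dict per substring, B computes one pass of prefix character-parity bitmasks and tests each (start,end) pair in O(1) by checking that the XOR of the two prefix masks has at most one bit set (d & (d-1) == 0).
import Mathlib
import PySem

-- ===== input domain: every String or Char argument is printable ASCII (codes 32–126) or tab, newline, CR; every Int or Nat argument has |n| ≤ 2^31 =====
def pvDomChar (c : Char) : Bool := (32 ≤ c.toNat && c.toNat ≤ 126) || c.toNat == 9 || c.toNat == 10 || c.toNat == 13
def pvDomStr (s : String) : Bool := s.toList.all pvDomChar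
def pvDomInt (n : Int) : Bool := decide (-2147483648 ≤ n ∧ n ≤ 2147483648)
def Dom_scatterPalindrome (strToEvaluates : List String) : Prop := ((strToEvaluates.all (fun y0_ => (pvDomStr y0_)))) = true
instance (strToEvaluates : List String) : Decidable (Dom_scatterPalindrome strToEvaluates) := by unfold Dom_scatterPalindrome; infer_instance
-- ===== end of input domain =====

-- B replaces A's per-substring frequency dict (O(n^3) per string) by one pass of prefix
-- character-parity bitmasks plus an O(1) test per (start,end) pair (O(n^2) per string).

-- ===== PORT A =====
-- Python iterates a string as length-1 strings; ported as Char iteration with a Char-keyed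
-- dict (exact: equality of single-character strings is equality of the characters).
def scatterPalindrome (strToEvaluates : List String) : List Int :=
  strToEvaluates.foldl (fun result s =>
    let cs := s.toList
    let lst := (PySem.List.pyRange 0 (PySem.List.len cs + 1) 1).foldl (fun acc start =>
        (PySem.List.pyRange (start + 1) (PySem.List.len cs + 1) 1).foldl (fun acc e =>
          acc ++ [PySem.List.slice cs (some start) (some e)]) acc) []
    let longest := lst.foldl (fun (cnt : Int) sub =>
        let d : PySem.Dict Char Int := sub.foldl (fun (d : PySem.Dict Char Int) c =>
            if !d.contains c then d.insert c 1 else d.insert c (d.getD c 0 + 1))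
          PySem.Dict.empty
        let odd : Int := d.items.foldl (fun (o : Int) kv =>
            if PySem.Int.mod kv.2 2 ≠ 0 then o + 1 else o) 0
        if odd ≤ 1 then cnt + 1 else cnt) 0
    result ++ [longest]) []

-- ===== PORT B =====
-- prefix parity masks: pvPref m cs = [m, m^bit(c0), m^bit(c0)^bit(c1), …]
def pvPref : Nat → List Char → List Nat
  | m, [] => [m]
  | m, c :: cs => m :: pvPref (m ^^^ (1 <<< c.toNat)) cs

def pvPalCount (s : String) : Int :=
  let cs := s.toList
  let n := cs.length
  let pref := pvPref 0 cs
  (List.range n).foldl (fun (cnt : Int) i =>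
    (List.range' (i + 1) (n - i)).foldl (fun (cnt : Int) j =>
      let d := pref.getD i 0 ^^^ pref.getD j 0
      if d &&& (d - 1) == 0 then cnt + 1 else cnt) cnt) 0

def scatterPalindrome_alt (strToEvaluates : List String) : List Int :=
  strToEvaluates.map pvPalCount

-- ===== PRECONDITION & SPEC =====
def Spec_scatterPalindrome (strToEvaluates : List String) (out : List Int) : Prop := out = scatterPalindrome_alt strToEvaluates
instance (strToEvaluates : List String) (out : List Int) : Decidable (Spec_scatterPalindrome strToEvaluates out) := by unfold Spec_scatterPalindrome; infer_instance

-- ===== CLAIM (what is proved, stated in full; the proofs are below) =====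
def Claim_equal_scatterPalindrome : Prop := ∀ (strToEvaluates : List String), Dom_scatterPalindrome strToEvaluates → Spec_scatterPalindrome strToEvaluates (scatterPalindrome strToEvaluates)

-- ===== LEMMAS AND PROOFS =====

-- proof-side names for A's two inner loops
def pvAOdd (l : List Char) : Int :=
  ((l.foldl (fun (d : PySem.Dict Char Int) c =>
      if !d.contains c then d.insert c 1 else d.insert c (d.getD c 0 + 1))
    PySem.Dict.empty).items).foldl (fun (o : Int) kv =>
      if PySem.Int.mod kv.2 2 ≠ 0 then o + 1 else o) 0

def pvStep (m : Nat) (c : Char) : Nat := m ^^^ (1 <<< c.toNat)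
def pvMask (l : List Char) : Nat := l.foldl pvStep 0

-- "at most one character with odd multiplicity"
def pvGood (l : List Char) : Prop :=
  ∀ c ∈ l, ∀ d ∈ l, l.count c % 2 = 1 → l.count d % 2 = 1 → c = d

lemma pvChar_inj {a b : Char} (h : a.toNat = b.toNat) : a = b :=
  Char.ext (UInt32.toNat_inj.mp h)

lemma pvMask_foldl (l : List Char) (m : Nat) : l.foldl pvStep m = m ^^^ pvMask l := by
  induction l generalizing m with
  | nil => simp [pvMask]
  | cons c t ih =>
    have hc : pvMask (c :: t) = (1 <<< c.toNat) ^^^ pvMask t := by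
      show List.foldl pvStep (pvStep 0 c) t = _
      rw [ih]
      simp [pvStep]
    rw [List.foldl_cons, ih, hc]
    simp [pvStep, Nat.xor_assoc]

lemma pvMask_cons (c : Char) (t : List Char) :
    pvMask (c :: t) = (1 <<< c.toNat) ^^^ pvMask t := by
  show List.foldl pvStep (pvStep 0 c) t = _
  rw [pvMask_foldl]
  simp [pvStep]

lemma pvMask_append (a b : List Char) : pvMask (a ++ b) = pvMask a ^^^ pvMask b := by
  show List.foldl pvStep 0 (a ++ b) = _
  rw [List.foldl_append, pvMask_foldl]
  rfl

lemma pvMask_testBit (l : List Char) (p : Nat) :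
    (pvMask l).testBit p = decide (l.countP (fun c => c.toNat == p) % 2 = 1) := by
  induction l with
  | nil => simp [pvMask]
  | cons c t ih =>
    rw [pvMask_cons, Nat.testBit_xor, ih, Nat.one_shiftLeft, Nat.testBit_two_pow,
      List.countP_cons]
    by_cases h : c.toNat = p
    · by_cases hb : List.countP (fun c => c.toNat == p) t % 2 = 1 <;>
        simp [h, hb] <;> omega
    · simp [h]

lemma pvCountP_code (l : List Char) (c : Char) :
    l.countP (fun d => d.toNat == c.toNat) = l.count c := by
  rw [List.count_eq_countP]
  apply List.countP_congr
  intro d _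
  by_cases h : d = c
  · simp [h]
  · have hne : d.toNat ≠ c.toNat := fun hh => h (pvChar_inj hh)
    simp [beq_iff_eq, h, hne]

lemma pvBits (l : List Char) (p : Nat) :
    (pvMask l).testBit p = true ↔ ∃ c ∈ l, c.toNat = p ∧ l.count c % 2 = 1 := by
  rw [pvMask_testBit, decide_eq_true_eq]
  constructor
  · intro hodd
    have hpos : 0 < List.countP (fun c => c.toNat == p) l := by omega
    obtain ⟨c, hc, hcp⟩ := List.countP_pos_iff.mp hpos
    have hcp' : c.toNat = p := by simpa using hcp
    subst hcp'
    exact ⟨c, hc, rfl, by rwa [pvCountP_code] at hodd⟩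
  · rintro ⟨c, hc, rfl, hodd⟩
    rwa [pvCountP_code]

lemma pvDivPred (d m : Nat) (hd : d ≠ 0) (hm : m % d ≠ 0) : (m - 1) / d = m / d := by
  have h0 : 0 < d := Nat.pos_of_ne_zero hd
  have hdm := Nat.div_add_mod m d
  have key : m - 1 = d * (m / d) + (m % d - 1) := by omega
  have hlt : m % d - 1 < d := by
    have := Nat.mod_lt m h0
    omega
  rw [key, Nat.mul_add_div h0, Nat.div_eq_of_lt hlt]
  omega

lemma pvTestBitPred (m i j : Nat) (hi : m.testBit i = true) (hij : i < j) :
    (m - 1).testBit j = m.testBit j := by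
  have hmod : m % 2 ^ j ≠ 0 := by
    intro h0
    have hb := Nat.testBit_mod_two_pow m j i
    rw [h0, Nat.zero_testBit] at hb
    simp [hi, hij] at hb
  rw [Nat.testBit_eq_decide_div_mod_eq, Nat.testBit_eq_decide_div_mod_eq,
    pvDivPred _ _ (by positivity) hmod]

lemma pvAndPred (m : Nat) :
    m &&& (m - 1) = 0 ↔ ∀ i j, m.testBit i = true → m.testBit j = true → i = j := by
  constructor
  · intro h i j hi hj
    by_contra hne
    rcases Nat.lt_or_ge i j with hij | hij
    · have hj' : (m - 1).testBit j = true := by rw [pvTestBitPred m i j hi hij]; exact hj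
      have := congrArg (Nat.testBit · j) h
      simp [Nat.testBit_and, hj, hj', Nat.zero_testBit] at this
    · have hij' : j < i := by omega
      have hi' : (m - 1).testBit i = true := by rw [pvTestBitPred m j i hj hij']; exact hi
      have := congrArg (Nat.testBit · i) h
      simp [Nat.testBit_and, hi, hi', Nat.zero_testBit] at this
  · intro h
    apply Nat.eq_of_testBit_eq
    intro j
    rw [Nat.testBit_and, Nat.zero_testBit]
    cases hj : m.testBit j with
    | false => simp
    | true =>
      have hm : m = 2 ^ j := by
        apply Nat.eq_of_testBit_eq
        intro i
        rw [Nat.testBit_two_pow]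
        cases hi : m.testBit i with
        | true => simp [h i j hi hj]
        | false =>
          by_cases hij : j = i
          · subst hij; simp [hj] at hi
          · simp [hij]
      rw [hm, Nat.testBit_two_pow_sub_one]
      simp

lemma pvB_cond (l : List Char) :
    ((pvMask l) &&& (pvMask l - 1) == 0) = true ↔ pvGood l := by
  rw [beq_iff_eq, pvAndPred]
  constructor
  · intro h c hc d hd hcodd hdodd
    exact pvChar_inj (h c.toNat d.toNat ((pvBits l c.toNat).mpr ⟨c, hc, rfl, hcodd⟩)
      ((pvBits l d.toNat).mpr ⟨d, hd, rfl, hdodd⟩))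
  · intro h i j hi hj
    obtain ⟨c, hc, rfl, hcodd⟩ := (pvBits l i).mp hi
    obtain ⟨d, hd, rfl, hdodd⟩ := (pvBits l j).mp hj
    rw [h c hc d hd hcodd hdodd]

lemma pvCountP_le_one {α : Type} (u : List α) (p : α → Bool) (hu : u.Nodup) :
    u.countP p ≤ 1 ↔ ∀ a ∈ u, ∀ b ∈ u, p a → p b → a = b := by
  induction u with
  | nil => simp
  | cons x t ih =>
    have hx : x ∉ t := (List.nodup_cons.mp hu).1
    have ht : t.Nodup := (List.nodup_cons.mp hu).2
    rw [List.countP_cons]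
    by_cases hpx : p x = true
    · simp only [hpx, if_true]
      constructor
      · intro h a ha b hb hpa hpb
        have hz : t.countP p = 0 := by omega
        have hno := List.countP_eq_zero.mp hz
        rcases List.mem_cons.mp ha with rfl | ha'
        · rcases List.mem_cons.mp hb with rfl | hb'
          · rfl
          · exact absurd hpb (hno b hb')
        · exact absurd hpa (hno a ha')
      · intro h
        have hz : t.countP p = 0 := by
          rw [List.countP_eq_zero]
          intro a ha hpa
          have := h a (List.mem_cons_of_mem _ ha) x List.mem_cons_self hpa hpx
          exact hx (this ▸ ha)
        omega
    · simp only [hpx]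
      constructor
      · intro h a ha b hb hpa hpb
        rcases List.mem_cons.mp ha with rfl | ha'
        · exact absurd hpa (by simp [hpx])
        · rcases List.mem_cons.mp hb with rfl | hb'
          · exact absurd hpb (by simp [hpx])
          · exact (ih ht).mp h a ha' b hb' hpa hpb
      · intro h
        exact (ih ht).mpr (fun a ha b hb hpa hpb =>
          h a (List.mem_cons_of_mem _ ha) b (List.mem_cons_of_mem _ hb) hpa hpb)

lemma pvAOdd_eq (l : List Char) :
    pvAOdd l = ((PySem.Set.ofList l).countP (fun c => decide (l.count c % 2 = 1)) : Int) := by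
  unfold pvAOdd
  have hd : l.foldl (fun (d : PySem.Dict Char Int) c =>
      if !d.contains c then d.insert c 1 else d.insert c (d.getD c 0 + 1))
      PySem.Dict.empty = PySem.Dict.counter l := by
    rw [← PySem.Dict.foldl_insert_getD_add_one_eq_counter]
    apply PySem.List.foldl_congr_mem
    intro d c _
    cases hcc : d.contains c
    · simp [PySem.Dict.getD_of_not_contains d 0 hcc]
    · simp
  rw [hd, PySem.List.foldl_ite_add_one (fun kv : Char × Int => PySem.Int.mod kv.2 2 ≠ 0),
    zero_add, PySem.Dict.items_counter, List.countP_map, Nat.cast_inj]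
  apply List.countP_congr
  intro c _
  have hm2 : PySem.Int.mod ((List.count c l : Nat) : Int) 2 = ((List.count c l % 2 : Nat) : Int) := by
    exact_mod_cast PySem.Int.mod_natCast (List.count c l) 2
  simp only [Function.comp, hm2, decide_eq_true_eq]
  constructor <;> intro h' <;> omega

lemma pvA_cond (l : List Char) : pvAOdd l ≤ 1 ↔ pvGood l := by
  rw [pvAOdd_eq]
  have h1 := pvCountP_le_one (PySem.Set.ofList l)
    (fun c => decide (l.count c % 2 = 1)) (PySem.Set.nodup_ofList l)
  constructor
  · intro h c hc d hd hc1 hd1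
    exact h1.mp (by exact_mod_cast h) c ((PySem.Set.mem_ofList l c).mpr hc) d
      ((PySem.Set.mem_ofList l d).mpr hd) (by simp [hc1]) (by simp [hd1])
  · intro h
    have := h1.mpr (fun a ha b hb hpa hpb =>
      h a ((PySem.Set.mem_ofList l a).mp ha) b ((PySem.Set.mem_ofList l b).mp hb)
        (by simpa using hpa) (by simpa using hpb))
    exact_mod_cast this

lemma pvPred_eq (l : List Char) :
    (decide (pvAOdd l ≤ 1)) = ((pvMask l) &&& (pvMask l - 1) == 0) := by
  by_cases h : pvGood l
  · rw [decide_eq_true ((pvA_cond l).mpr h), (pvB_cond l).mpr h]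
  · rw [decide_eq_false (fun hh => h ((pvA_cond l).mp hh))]
    exact (Bool.eq_false_iff.mpr (fun hh => h ((pvB_cond l).mp hh))).symm

lemma pvPref_getD (cs : List Char) (m : Nat) (i : Nat) (h : i ≤ cs.length) :
    (pvPref m cs).getD i 0 = m ^^^ pvMask (cs.take i) := by
  induction cs generalizing m i with
  | nil =>
    have : i = 0 := by simpa using h
    subst this
    simp [pvPref, pvMask]
  | cons c t ih =>
    cases i with
    | zero => simp [pvPref, pvMask]
    | succ k =>
      rw [pvPref, List.getD_cons_succ, ih _ k (by simpa using h)]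
      simp [List.take_succ_cons, pvMask_cons, Nat.xor_assoc]

lemma pvPair (cs : List Char) (i j : Nat) (hij : i < j) (hj : j ≤ cs.length) :
    (pvPref 0 cs).getD i 0 ^^^ (pvPref 0 cs).getD j 0
      = pvMask ((cs.drop i).take (j - i)) := by
  rw [pvPref_getD _ _ i (by omega), pvPref_getD _ _ j hj, Nat.zero_xor, Nat.zero_xor]
  have hsplit : cs.take j = cs.take i ++ (cs.drop i).take (j - i) := by
    conv_lhs => rw [show j = i + (j - i) from by omega]
    exact List.take_add
  rw [hsplit, pvMask_append, ← Nat.xor_assoc, Nat.xor_self, Nat.zero_xor]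

lemma pvTerm (cs : List Char) (k : Nat) (hk : k < cs.length) :
    ((List.countP (fun sub => decide (pvAOdd sub ≤ 1))
      ((PySem.List.pyRange ((k : Int) + 1) ((cs.length + 1 : Nat) : Int) 1).map
        (fun e => PySem.List.slice cs (some (k : Int)) (some e)))) : Int)
    = ((List.range' (k + 1) (cs.length - k)).countP (fun j =>
        ((pvPref 0 cs).getD k 0 ^^^ (pvPref 0 cs).getD j 0) &&&
          (((pvPref 0 cs).getD k 0 ^^^ (pvPref 0 cs).getD j 0) - 1) == 0) : Int) := by
  rw [List.countP_map, List.range'_eq_map_range, List.countP_map,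
    PySem.List.pyRange_one, List.countP_map]
  have hlen : (((cs.length + 1 : Nat) : Int) - ((k : Int) + 1)).toNat = cs.length - k := by
    omega
  rw [hlen, Nat.cast_inj]
  apply List.countP_congr
  intro u hu
  have hu' : u < cs.length - k := List.mem_range.mp hu
  have hidx : ((k : Int) + 1 + (u : Int)) = ((k + 1 + u : Nat) : Int) := by push_cast; ring
  simp only [Function.comp, hidx, PySem.List.slice_natCast,
    show k + 1 + u - k = u + 1 from by omega]
  rw [pvPred_eq]
  have hpair := pvPair cs k (k + 1 + u) (by omega) (by omega)
  rw [show k + 1 + u - k = u + 1 from by omega] at hpair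
  rw [hpair]

lemma pvString (s : String) :
    (let cs := s.toList
     let lst := (PySem.List.pyRange 0 (PySem.List.len cs + 1) 1).foldl (fun acc start =>
        (PySem.List.pyRange (start + 1) (PySem.List.len cs + 1) 1).foldl (fun acc e =>
          acc ++ [PySem.List.slice cs (some start) (some e)]) acc) []
     lst.foldl (fun (cnt : Int) sub =>
        let d : PySem.Dict Char Int := sub.foldl (fun (d : PySem.Dict Char Int) c =>
            if !d.contains c then d.insert c 1 else d.insert c (d.getD c 0 + 1))
          PySem.Dict.empty
        let odd : Int := d.items.foldl (fun (o : Int) kv =>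
            if PySem.Int.mod kv.2 2 ≠ 0 then o + 1 else o) 0
        if odd ≤ 1 then cnt + 1 else cnt) 0)
    = pvPalCount s := by
  unfold pvPalCount
  simp only [PySem.List.len_eq]
  -- A side: materialise the substring list as a flatMap, then count
  rw [PySem.List.foldl_congr_mem _ _
    (fun (acc : List (List Char)) (start : Int) =>
      acc ++ (PySem.List.pyRange (start + 1) ((s.toList.length : Int) + 1) 1).map
        (fun e => PySem.List.slice s.toList (some start) (some e))) _
    (fun acc x _ => PySem.List.foldl_append_singleton_eq_map _ _ _)]
  rw [PySem.List.foldl_append_eq_flatMap, List.nil_append]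
  rw [PySem.List.foldl_ite_add_one, zero_add, List.countP_flatMap]
  -- B side: each inner loop is a count, the outer loop a sum of counts
  have hinner : ∀ (acc : Int) (i : Nat),
      List.foldl (fun (cnt : Int) j =>
        if ((pvPref 0 s.toList).getD i 0 ^^^ (pvPref 0 s.toList).getD j 0) &&&
            (((pvPref 0 s.toList).getD i 0 ^^^ (pvPref 0 s.toList).getD j 0) - 1) == 0
        then cnt + 1 else cnt) acc (List.range' (i + 1) (s.toList.length - i))
      = acc + ((List.range' (i + 1) (s.toList.length - i)).countP (fun j =>
          ((pvPref 0 s.toList).getD i 0 ^^^ (pvPref 0 s.toList).getD j 0) &&&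
            (((pvPref 0 s.toList).getD i 0 ^^^ (pvPref 0 s.toList).getD j 0) - 1) == 0) : Int) := by
    intro acc i
    rw [PySem.List.foldl_ite_add_one]
    simp only [Bool.decide_eq_true]
  simp only [hinner]
  rw [PySem.List.foldl_add, zero_add]
  -- align the two sums
  rw [show ((s.toList.length : Int) + 1) = ((s.toList.length + 1 : Nat) : Int) from by
    push_cast; ring]
  rw [PySem.List.pyRange_zero_nat, List.map_map, Nat.cast_list_sum, List.map_map]
  rw [List.range_succ, List.map_append, List.sum_append]
  simp only [Function.comp, List.map_cons, List.map_nil, List.sum_cons, List.sum_nil,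
    add_zero]
  rw [PySem.List.pyRange_one_eq_nil
    (a := (s.toList.length : Int) + 1) (b := ((s.toList.length + 1 : Nat) : Int))
    (by push_cast; omega)]
  simp only [List.map_nil, List.countP_nil, Nat.cast_zero, add_zero]
  refine congrArg List.sum (List.map_congr_left ?_)
  intro k hk
  have hk' : k < s.toList.length := List.mem_range.mp hk
  exact pvTerm s.toList k hk'

-- ===== VERDICT (by name: the statement is the Claim_ definition above) =====
theorem scatterPalindrome_spec : Claim_equal_scatterPalindrome := by
  intro xs _
  show scatterPalindrome xs = scatterPalindrome_alt xs
  unfold scatterPalindrome scatterPalindrome_alt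
  rw [PySem.List.foldl_append_singleton_eq_map]
  simp only [List.nil_append]
  exact List.map_congr_left (fun s _ => pvString s)
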